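-- pv_equiv track=rewrite | github.com/Elang89/hf-evolution | app/services/general_repository.py | _convert_to_sql
-- ===== SOURCE A (Python) =====
-- from typing import Any, Dict, List, Tuple
--
-- def _convert_to_sql(data_points: List[Dict[str, Any]]) -> List[Tuple]:
--     values = []
--
--     for data_point in data_points:
--         tup_values = tuple(data_point.values())
--         sql_values = str(tup_values)
--
--         if len(tup_values) == 1:
--             sql_values = sql_values[:-2] + sql_values[-1]
--         values.append(sql_values)
--
--     return values
-- ===== SOURCE B (Python) =====
-- def _convert_to_sql(data_points):
--     return ["(" + ", ".join(repr(v) for v in dp.values()) + ")" for dp in data_points]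
-- ===== Notes on version B (the rewrite author's own statement) =====
-- stated objective: simpler
-- what changed: Replaces the accumulate-with-append loop, str(tuple) conversion and the len==1 slice fix-up by a single comprehension that joins repr(v) with ', ' inside parentheses, which yields the singleton form directly.
import Mathlib
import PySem

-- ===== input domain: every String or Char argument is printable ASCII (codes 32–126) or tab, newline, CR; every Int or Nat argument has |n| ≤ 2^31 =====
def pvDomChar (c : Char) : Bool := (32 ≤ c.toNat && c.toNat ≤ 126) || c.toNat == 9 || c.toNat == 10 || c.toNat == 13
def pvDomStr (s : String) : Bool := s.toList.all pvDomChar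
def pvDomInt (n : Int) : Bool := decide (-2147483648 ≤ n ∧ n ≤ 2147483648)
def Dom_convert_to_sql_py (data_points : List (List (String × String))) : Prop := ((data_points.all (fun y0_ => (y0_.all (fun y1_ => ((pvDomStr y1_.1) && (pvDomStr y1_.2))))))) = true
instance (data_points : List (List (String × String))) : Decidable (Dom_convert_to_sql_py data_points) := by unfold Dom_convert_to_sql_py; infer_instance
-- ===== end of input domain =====

-- B rewrites A's accumulate-append loop + str(tuple) + singleton-slice fix-up as one
-- comprehension joining repr(v) with ', ' inside parentheses (objective: simpler).

-- Python's repr of a str, exact for the printable-ASCII + tab/newline/CR domain: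
-- single quotes unless the string contains ' and no ", escape \\, the quote, \t, \n, \r.
def pyReprChars (s : List Char) : List Char :=
  let q : Char := if s.contains '\'' && !(s.contains '"') then '"' else '\''
  q :: s.flatMap (fun c =>
    if c = '\\' then ['\\', '\\']
    else if c = q then ['\\', q]
    else if c = '\t' then ['\\', 't']
    else if c = '\n' then ['\\', 'n']
    else if c = '\r' then ['\\', 'r']
    else [c]) ++ [q]

-- ===== PORT A =====
-- str(tup) for a tuple of strings, hand-ported (exact on the ASCII domain):
-- "()" for empty, "('x',)" for a 1-tuple, repr's joined by ", " otherwise.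
def strTupleChars (vs : List String) : List Char :=
  '(' :: (List.intercalate [',', ' '] (vs.map (fun v => pyReprChars v.toList)))
    ++ (if vs.length = 1 then [','] else []) ++ [')']

def convert_to_sql_py (data_points : List (List (String × String))) : List String :=
  data_points.foldl (fun values data_point =>
    let tup_values := data_point.map Prod.snd        -- tuple(data_point.values())
    let sql_values := strTupleChars tup_values       -- str(tup_values)
    let sql_values :=
      if tup_values.length = 1 then
        match PySem.List.pyGet? sql_values (-1) with -- sql_values[-1]
        | some c => PySem.List.slice sql_values none (some (-2)) ++ [c]  -- sql_values[:-2] + …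
        | none => []                                  -- unreachable: str of a 1-tuple is nonempty
      else sql_values
    values ++ [String.ofList sql_values]) []

-- ===== PORT B =====
def convert_to_sql_py_alt (data_points : List (List (String × String))) : List String :=
  data_points.map (fun data_point =>
    String.ofList ('(' ::
      (List.intercalate [',', ' '] (data_point.map (fun p => pyReprChars p.2.toList)))
      ++ [')']))

-- ===== PRECONDITION & SPEC =====
def Spec_convert_to_sql_py (data_points : List (List (String × String))) (out : List String) : Prop := out = convert_to_sql_py_alt data_points
instance (data_points : List (List (String × String))) (out : List String) : Decidable (Spec_convert_to_sql_py data_points out) := by unfold Spec_convert_to_sql_py; infer_instance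

-- ===== CLAIM (what is proved, stated in full; the proofs are below) =====
def Claim_equal_convert_to_sql_py : Prop := ∀ (data_points : List (List (String × String))), Dom_convert_to_sql_py data_points → Spec_convert_to_sql_py data_points (convert_to_sql_py data_points)

-- ===== LEMMAS AND PROOFS =====

-- A's per-dict string equals B's per-dict string.
lemma elem_eq (dp : List (String × String)) :
    (if (dp.map Prod.snd).length = 1 then
        match PySem.List.pyGet? (strTupleChars (dp.map Prod.snd)) (-1) with
        | some c => PySem.List.slice (strTupleChars (dp.map Prod.snd)) none (some (-2)) ++ [c]
        | none => []
     else strTupleChars (dp.map Prod.snd))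
    = '(' :: (List.intercalate [',', ' '] (dp.map (fun p => pyReprChars p.2.toList))) ++ [')'] := by
  match dp with
  | [] => simp [strTupleChars]
  | [p] =>
    have hs : strTupleChars [p.2] = (('(' :: pyReprChars p.2.toList) ++ [',']) ++ [')'] := by
      simp [strTupleChars, List.intercalate]
    have hlen : (('(' :: pyReprChars p.2.toList) ++ [',', ')']).length - 2
        = ('(' :: pyReprChars p.2.toList).length := by simp
    simp only [List.map_cons, List.map_nil, List.length_cons, List.length_nil,
      if_true]
    rw [hs]
    simp only [PySem.List.pyGet?_neg_one_append_singleton]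
    rw [show (('(' :: pyReprChars p.2.toList) ++ [',']) ++ [')']
          = ('(' :: pyReprChars p.2.toList) ++ [',', ')'] from by simp,
        PySem.List.slice_to_neg_ofNat _ 2 (by norm_num), hlen, List.take_left]
    simp [List.intercalate]
  | p :: q :: r => simp [strTupleChars, Function.comp_def]

-- ===== VERDICT (by name: the statement is the Claim_ definition above) =====
theorem convert_to_sql_py_spec : Claim_equal_convert_to_sql_py := by
  intro dps _
  unfold Spec_convert_to_sql_py convert_to_sql_py convert_to_sql_py_alt
  have h : ∀ (l : List (List (String × String))) (acc : List String),
      List.foldl (fun values data_point =>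
        let tup_values := data_point.map Prod.snd
        let sql_values := strTupleChars tup_values
        let sql_values :=
          if tup_values.length = 1 then
            match PySem.List.pyGet? sql_values (-1) with
            | some c => PySem.List.slice sql_values none (some (-2)) ++ [c]
            | none => []
          else sql_values
        values ++ [String.ofList sql_values]) acc l
      = acc ++ l.map (fun data_point =>
          String.ofList ('(' ::
            (List.intercalate [',', ' '] (data_point.map (fun p => pyReprChars p.2.toList)))
            ++ [')'])) := by
    intro l
    induction l with
    | nil => intro acc; simp
    | cons d t ih =>
      intro acc
      simp only [List.foldl_cons, List.map_cons]
      rw [ih]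
      simp only [elem_eq]
      simp
  rw [h dps []]
  simp
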